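-- pv_equiv track=rewrite | github.com/Tolmeton/Hegemonikon | 60_実験｜Peira/00_汎用｜General/e1_formal_prompt_experiment.py | _generate_ccl_workflow
-- ===== SOURCE A (Python) =====
-- def _generate_ccl_workflow(code: str) -> str:
--     """コードから CCL ワークフロー表記を生成する。
--
--     より構造化された表現: 関数→分岐→反復→出力 のパイプラインとして記述する。
--     """
--     lines = code.strip().split('\n')
--     n_lines = len(lines)
--
--     # コード構造の特徴を抽出
--     funcs = [l.strip() for l in lines if l.strip().startswith('def ')]
--     classes = [l.strip() for l in lines if l.strip().startswith('class ')]
--     loops = sum(1 for l in lines if l.strip().startswith(('for ', 'while ')))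
--     conds = sum(1 for l in lines if l.strip().startswith(('if ', 'elif ')))
--     returns = sum(1 for l in lines if 'return ' in l)
--     assigns = sum(1 for l in lines if '=' in l and not l.strip().startswith(('#', 'if', 'elif', 'for', 'while', 'def', 'class')))
--
--     # CCL ワークフロー構造
--     parts = []
--
--     # 入力層 (関数定義)
--     if classes:
--         parts.append(f'/arc{{class×{len(classes)}}}')
--     if funcs:
--         parts.append(f'/noe{{def×{len(funcs)}}}')
--
--     # 処理層 (制御フロー)
--     if conds > 0:
--         parts.append(f'/ske{{cond×{conds}}}')
--     if loops > 0:
--         parts.append(f'F:[×{loops}]{{/pei}}')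
--     if assigns > 2:
--         parts.append(f'/tek{{assign×{assigns}}}')
--
--     # 出力層
--     if returns > 0:
--         parts.append(f'/ene{{return×{returns}}}')
--
--     if not parts:
--         parts = [f'/tek{{lines={n_lines}}}']
--
--     return '_'.join(parts)
-- ===== SOURCE B (Python) =====
-- def _generate_ccl_workflow(code: str) -> str:
--     """Tag-emission variant: each line emits structure tags, a Counter-style dict
--     tallies them once, and a declarative spec table drives the output parts."""
--     lines = code.strip().split('\n')
--
--     def tags(l):
--         s = l.strip()
--         out = []
--         if s.startswith('class '):
--             out.append('class')
--         if s.startswith('def '):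
--             out.append('def')
--         if s.startswith(('if ', 'elif ')):
--             out.append('cond')
--         if s.startswith(('for ', 'while ')):
--             out.append('loop')
--         if '=' in l and not s.startswith(('#', 'if', 'elif', 'for', 'while', 'def', 'class')):
--             out.append('assign')
--         if 'return ' in l:
--             out.append('return')
--         return out
--
--     counts = {}
--     for l in lines:
--         for t in tags(l):
--             counts[t] = counts.get(t, 0) + 1
--
--     spec = [
--         ('class', 1, '/arc{class×', '}'),
--         ('def', 1, '/noe{def×', '}'),
--         ('cond', 1, '/ske{cond×', '}'),
--         ('loop', 1, 'F:[×', ']{/pei}'),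
--         ('assign', 3, '/tek{assign×', '}'),
--         ('return', 1, '/ene{return×', '}'),
--     ]
--     parts = []
--     for tag, lo, pre, suf in spec:
--         n = counts.get(tag, 0)
--         if n >= lo:
--             parts.append(pre + str(n) + suf)
--     if not parts:
--         parts = ['/tek{lines=%d}' % len(lines)]
--     return '_'.join(parts)
-- ===== Notes on version B (the rewrite author's own statement) =====
-- stated objective: alternative
-- what changed: Instead of six separate predicate scans, each line emits symbolic structure tags ('class','def','cond','loop','assign','return'), a Counter-style dict tallies the tag stream once, and a declarative spec table (tag, threshold, prefix, suffix) is folded to produce the output parts, replacing the hand-written branch chain.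
import Mathlib
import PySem

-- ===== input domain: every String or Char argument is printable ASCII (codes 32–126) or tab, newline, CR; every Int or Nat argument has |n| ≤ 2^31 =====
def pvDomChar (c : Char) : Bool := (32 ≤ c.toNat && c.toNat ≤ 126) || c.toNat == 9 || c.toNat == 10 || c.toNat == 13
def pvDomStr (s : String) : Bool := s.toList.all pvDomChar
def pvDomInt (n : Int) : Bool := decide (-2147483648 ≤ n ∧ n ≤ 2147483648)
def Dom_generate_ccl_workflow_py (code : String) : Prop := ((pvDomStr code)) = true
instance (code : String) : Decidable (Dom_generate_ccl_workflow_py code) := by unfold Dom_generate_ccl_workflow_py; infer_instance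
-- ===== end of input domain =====

-- B replaces the six separate scans with tag emission per line, one Counter tally, and a spec-table fold; return value only, no mutation.

-- ===== PORT A =====
-- literal port of A: six separate scans over `lines`, counts as sum(1 for …) = countP
def generate_ccl_workflow_py (code : String) : String :=
  let lines := (PySem.Str.split? (PySem.Str.strip code) "\n").getD []
  let n_lines : Int := (lines.length : Int)
  let funcs := (lines.filter (fun l => PySem.Str.startswith (PySem.Str.strip l) "def ")).map PySem.Str.strip
  let classes := (lines.filter (fun l => PySem.Str.startswith (PySem.Str.strip l) "class ")).map PySem.Str.strip
  let loops : Int := (lines.countP (fun l => PySem.Str.startswith (PySem.Str.strip l) "for " || PySem.Str.startswith (PySem.Str.strip l) "while ") : Int)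
  let conds : Int := (lines.countP (fun l => PySem.Str.startswith (PySem.Str.strip l) "if " || PySem.Str.startswith (PySem.Str.strip l) "elif ") : Int)
  let returns : Int := (lines.countP (fun l => PySem.Str.isIn "return " l) : Int)
  let assigns : Int := (lines.countP (fun l => PySem.Str.isIn "=" l &&
      !(PySem.Str.startswith (PySem.Str.strip l) "#" || PySem.Str.startswith (PySem.Str.strip l) "if" ||
        PySem.Str.startswith (PySem.Str.strip l) "elif" || PySem.Str.startswith (PySem.Str.strip l) "for" ||
        PySem.Str.startswith (PySem.Str.strip l) "while" || PySem.Str.startswith (PySem.Str.strip l) "def" ||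
        PySem.Str.startswith (PySem.Str.strip l) "class")) : Int)
  let parts : List String := []
  let parts := if classes ≠ [] then parts ++ ["/arc{class×" ++ PySem.Int.toStr (classes.length : Int) ++ "}"] else parts
  let parts := if funcs ≠ [] then parts ++ ["/noe{def×" ++ PySem.Int.toStr (funcs.length : Int) ++ "}"] else parts
  let parts := if conds > 0 then parts ++ ["/ske{cond×" ++ PySem.Int.toStr conds ++ "}"] else parts
  let parts := if loops > 0 then parts ++ ["F:[×" ++ PySem.Int.toStr loops ++ "]{/pei}"] else parts
  let parts := if assigns > 2 then parts ++ ["/tek{assign×" ++ PySem.Int.toStr assigns ++ "}"] else parts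
  let parts := if returns > 0 then parts ++ ["/ene{return×" ++ PySem.Int.toStr returns ++ "}"] else parts
  let parts := if parts = [] then ["/tek{lines=" ++ PySem.Int.toStr n_lines ++ "}"] else parts
  PySem.Str.join "_" parts

-- ===== PORT B =====
-- B's tag emitter: a line contributes one tag per structural feature it exhibits
def genCclTags (l : String) : List String :=
  let s := PySem.Str.strip l
  let out : List String := []
  let out := if PySem.Str.startswith s "class " then out ++ ["class"] else out
  let out := if PySem.Str.startswith s "def " then out ++ ["def"] else out
  let out := if PySem.Str.startswith s "if " || PySem.Str.startswith s "elif " then out ++ ["cond"] else out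
  let out := if PySem.Str.startswith s "for " || PySem.Str.startswith s "while " then out ++ ["loop"] else out
  let out := if PySem.Str.isIn "=" l &&
      !(PySem.Str.startswith s "#" || PySem.Str.startswith s "if" || PySem.Str.startswith s "elif" ||
        PySem.Str.startswith s "for" || PySem.Str.startswith s "while" || PySem.Str.startswith s "def" ||
        PySem.Str.startswith s "class") then out ++ ["assign"] else out
  let out := if PySem.Str.isIn "return " l then out ++ ["return"] else out
  out

-- B's spec table: (tag, threshold, prefix, suffix)
def genCclSpec : List (String × Int × String × String) :=
  [("class", 1, "/arc{class×", "}"),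
   ("def", 1, "/noe{def×", "}"),
   ("cond", 1, "/ske{cond×", "}"),
   ("loop", 1, "F:[×", "]{/pei}"),
   ("assign", 3, "/tek{assign×", "}"),
   ("return", 1, "/ene{return×", "}")]

def generate_ccl_workflow_py_alt (code : String) : String :=
  let lines := (PySem.Str.split? (PySem.Str.strip code) "\n").getD []
  let counts := lines.foldl (fun d l => (genCclTags l).foldl (fun d t => d.modify t 0 (· + 1)) d)
      (PySem.Dict.empty : PySem.Dict String Int)
  let parts := genCclSpec.foldl (fun parts sp =>
      let (tag, lo, pre, suf) := sp
      let n := counts.getD tag 0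
      if n ≥ lo then parts ++ [pre ++ PySem.Int.toStr n ++ suf] else parts) ([] : List String)
  let parts := if parts = [] then ["/tek{lines=" ++ PySem.Int.toStr (lines.length : Int) ++ "}"] else parts
  PySem.Str.join "_" parts

-- ===== PRECONDITION & SPEC =====
def Spec_generate_ccl_workflow_py (code : String) (out : String) : Prop := out = generate_ccl_workflow_py_alt code
instance (code : String) (out : String) : Decidable (Spec_generate_ccl_workflow_py code out) := by unfold Spec_generate_ccl_workflow_py; infer_instance

-- ===== CLAIM =====
def Claim_equal_generate_ccl_workflow_py : Prop := ∀ (code : String), Dom_generate_ccl_workflow_py code → Spec_generate_ccl_workflow_py code (generate_ccl_workflow_py code)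

-- ===== LEMMAS AND PROOFS =====

-- the tag-tally dict looked up at t is the count of t in the emitted tag stream
theorem getD_tally (lines : List String) (t : String) :
    (lines.foldl (fun d l => (genCclTags l).foldl (fun d t => d.modify t 0 (· + 1)) d)
      (PySem.Dict.empty : PySem.Dict String Int)).getD t 0
      = ((lines.flatMap genCclTags).count t : Int) := by
  have h : ∀ (d : PySem.Dict String Int),
      lines.foldl (fun d l => (genCclTags l).foldl (fun d t => d.modify t 0 (· + 1)) d) d
        = (lines.flatMap genCclTags).foldl (fun d t => d.modify t 0 (· + 1)) d := by
    induction lines with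
    | nil => intro d; rfl
    | cons hd tl ih => intro d; simp [List.flatMap_cons, List.foldl_append, ih]
  rw [h, PySem.Dict.getD_foldl_modify_add_one]
  simp [PySem.Dict.getD_empty]

-- the count of tag t in the stream is the countP of its predicate over the lines
theorem count_flatMap_eq_countP (lines : List String) (t : String) (p : String → Bool)
    (h : ∀ l, (genCclTags l).count t = if p l then 1 else 0) :
    (lines.flatMap genCclTags).count t = lines.countP p := by
  induction lines with
  | nil => rfl
  | cons hd tl ih => simp [List.count_append, List.countP_cons, ih, h hd]; split_ifs <;> omega

theorem tags_class (l : String) : (genCclTags l).count "class" =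
    if PySem.Str.startswith (PySem.Str.strip l) "class " then 1 else 0 := by
  simp only [genCclTags]; split_ifs <;> rfl

theorem tags_def (l : String) : (genCclTags l).count "def" =
    if PySem.Str.startswith (PySem.Str.strip l) "def " then 1 else 0 := by
  simp only [genCclTags]; split_ifs <;> rfl

theorem tags_cond (l : String) : (genCclTags l).count "cond" =
    if PySem.Str.startswith (PySem.Str.strip l) "if " || PySem.Str.startswith (PySem.Str.strip l) "elif " then 1 else 0 := by
  simp only [genCclTags]; split_ifs <;> rfl

theorem tags_loop (l : String) : (genCclTags l).count "loop" =
    if PySem.Str.startswith (PySem.Str.strip l) "for " || PySem.Str.startswith (PySem.Str.strip l) "while " then 1 else 0 := by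
  simp only [genCclTags]; split_ifs <;> rfl

theorem tags_assign (l : String) : (genCclTags l).count "assign" =
    if PySem.Str.isIn "=" l &&
      !(PySem.Str.startswith (PySem.Str.strip l) "#" || PySem.Str.startswith (PySem.Str.strip l) "if" ||
        PySem.Str.startswith (PySem.Str.strip l) "elif" || PySem.Str.startswith (PySem.Str.strip l) "for" ||
        PySem.Str.startswith (PySem.Str.strip l) "while" || PySem.Str.startswith (PySem.Str.strip l) "def" ||
        PySem.Str.startswith (PySem.Str.strip l) "class") then 1 else 0 := by
  simp only [genCclTags]; split_ifs <;> rfl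

theorem tags_return (l : String) : (genCclTags l).count "return" =
    if PySem.Str.isIn "return " l then 1 else 0 := by
  simp only [genCclTags]; split_ifs <;> rfl

-- a filtered comprehension is empty iff its count is zero
theorem filter_map_nil_iff {α β : Type} (p : α → Bool) (g : α → β) (xs : List α) :
    (List.map g (List.filter p xs) = []) ↔ ((xs.countP p : Int) = 0) := by
  simp [List.map_eq_nil_iff, List.filter_eq_nil_iff, List.countP_eq_zero]

-- a filtered comprehension's length is the count
theorem filter_map_len {α β : Type} (p : α → Bool) (g : α → β) (xs : List α) :
    ((xs.filter p).map g).length = xs.countP p := by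
  simp [List.length_map, ← List.countP_eq_length_filter]

-- ===== VERDICT =====
theorem generate_ccl_workflow_py_spec : Claim_equal_generate_ccl_workflow_py := by
  intro code _
  show generate_ccl_workflow_py code = generate_ccl_workflow_py_alt code
  simp only [generate_ccl_workflow_py, generate_ccl_workflow_py_alt, genCclSpec, List.foldl,
    getD_tally,
    count_flatMap_eq_countP _ _ _ tags_class, count_flatMap_eq_countP _ _ _ tags_def,
    count_flatMap_eq_countP _ _ _ tags_cond, count_flatMap_eq_countP _ _ _ tags_loop,
    count_flatMap_eq_countP _ _ _ tags_assign, count_flatMap_eq_countP _ _ _ tags_return,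
    filter_map_len, ne_eq, filter_map_nil_iff, ge_iff_le,
    show ∀ n : ℕ, (¬((n : Int) = 0)) = ((1 : Int) ≤ (n : Int)) from fun n => propext (by omega),
    show ∀ n : ℕ, ((0 : Int) < (n : Int)) = ((1 : Int) ≤ (n : Int)) from fun n => propext (by omega),
    show ∀ n : ℕ, ((2 : Int) < (n : Int)) = ((3 : Int) ≤ (n : Int)) from fun n => propext (by omega)]
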